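-- pv_equiv track=rewrite | github.com/BartvonMeijenfeldt/advent_of_code_2023 | 10/part2.py | get_enclosed_islands
-- ===== SOURCE A (Python) =====
-- from collections import defaultdict
--
-- def get_enclosed_islands(
--     islands: list[list[tuple[int, int]]], main_loop: set[tuple[int, int]]
-- ) -> list[list[tuple[int, int]]]:
--     main_loop_x = defaultdict(list)
--     for (y, x) in main_loop:
--         main_loop_x[x].append(y)
--
--     main_loop_y = defaultdict(list)
--     for (y, x) in main_loop:
--         main_loop_y[y].append(x)
--
--     enclosed_islands = []
--
--     for island in islands:
--         if is_enclosed_island(island, main_loop_y, main_loop_x):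
--             enclosed_islands.append(island)
--
--     return enclosed_islands
--
-- def is_enclosed_island(
--     island: list[tuple[int, int]], main_loop_y: dict[int, list[int]], main_loop_x: dict[int, list[int]]
-- ) -> bool:
--     for c_y, c_x in island:
--         if c_y % 2 == 1 or c_x % 2 == 1:
--             continue
--
--         c_y, c_x = c_y // 2, c_x // 2
--
--         if not is_enclosed_vertical(c_y, c_x, main_loop_x):
--             return False
--
--         if not is_enclosed_horizontal(c_y, c_x, main_loop_y):
--             return False
--
--     return True
--
-- def is_enclosed_vertical(c_y: int, c_x: int, main_loop_x: dict[int, list[int]]) -> bool: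
--     values_y = main_loop_x[c_x]
--     if not values_y:
--         return False
--
--     return min(values_y) < c_y < max(values_y)
--
-- def is_enclosed_horizontal(c_y: int, c_x: int, main_loop_y: dict[int, list[int]]) -> bool:
--     values_x = main_loop_y[c_y]
--     if not values_x:
--         return False
--
--     return min(values_x) < c_x < max(values_x)
-- ===== SOURCE B (Python) =====
-- def _cell_ok(cy, cx, x_bounds, y_bounds):
--     if cy % 2 == 1 or cx % 2 == 1:
--         return True
--     hy, hx = cy // 2, cx // 2
--     bx = x_bounds.get(hx)
--     if bx is None or not (bx[0] < hy < bx[1]):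
--         return False
--     by = y_bounds.get(hy)
--     return by is not None and by[0] < hx < by[1]
--
--
-- def get_enclosed_islands(islands, main_loop):
--     # one pass over the loop: per-column and per-row (min, max) bounds
--     x_bounds = {}
--     y_bounds = {}
--     for y, x in main_loop:
--         b = x_bounds.get(x)
--         x_bounds[x] = (y, y) if b is None else (min(b[0], y), max(b[1], y))
--         b = y_bounds.get(y)
--         y_bounds[y] = (x, x) if b is None else (min(b[0], x), max(b[1], x))
--     return [isl for isl in islands
--             if all(_cell_ok(cy, cx, x_bounds, y_bounds) for cy, cx in isl)]
-- ===== Notes on version B (the rewrite author's own statement) =====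
-- stated objective: alternative
-- what changed: Instead of grouping the loop cells into per-column/per-row lists and rescanning a whole list with min()/max() for every island cell, B precomputes per-column and per-row (min, max) bounds in one pass over the loop and answers each enclosure check with an O(1) dictionary lookup.
import Mathlib
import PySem

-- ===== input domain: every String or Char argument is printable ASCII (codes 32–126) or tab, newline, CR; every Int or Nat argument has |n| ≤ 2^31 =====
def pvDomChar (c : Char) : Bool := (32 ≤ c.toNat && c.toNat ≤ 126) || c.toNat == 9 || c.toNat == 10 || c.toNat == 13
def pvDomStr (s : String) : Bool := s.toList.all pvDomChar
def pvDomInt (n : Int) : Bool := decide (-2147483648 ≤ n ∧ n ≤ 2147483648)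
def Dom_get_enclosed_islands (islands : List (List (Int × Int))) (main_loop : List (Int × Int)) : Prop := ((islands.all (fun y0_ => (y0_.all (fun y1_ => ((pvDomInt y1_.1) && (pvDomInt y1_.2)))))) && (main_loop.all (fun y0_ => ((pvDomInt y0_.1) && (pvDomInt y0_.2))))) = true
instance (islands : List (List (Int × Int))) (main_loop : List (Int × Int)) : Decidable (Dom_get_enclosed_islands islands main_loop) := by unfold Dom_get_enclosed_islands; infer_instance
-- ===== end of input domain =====

-- B replaces A's per-cell min/max scans over the grouped per-column/per-row lists by
-- per-column and per-row (min, max) bounds precomputed in one pass over the loop, so each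
-- enclosure check is a single O(1) lookup (objective: alternative; no speed-up measured here).
-- main_loop is a Python set: its elements are modelled as a duplicate-free list; both
-- programs' results depend on it only through per-key min/max, so iteration order is immaterial.

-- ===== PORT A =====
def is_enclosed_vertical (c_y : Int) (c_x : Int) (main_loop_x : PySem.Dict Int (List Int)) : Bool :=
  let values_y := main_loop_x.getD c_x []
  if values_y.isEmpty then false
  else
    match PySem.List.min? values_y (fun v => v), PySem.List.max? values_y (fun v => v) with
    | some m, some M => decide (m < c_y ∧ c_y < M)
    | _, _ => false

def is_enclosed_horizontal (c_y : Int) (c_x : Int) (main_loop_y : PySem.Dict Int (List Int)) : Bool :=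
  let values_x := main_loop_y.getD c_y []
  if values_x.isEmpty then false
  else
    match PySem.List.min? values_x (fun v => v), PySem.List.max? values_x (fun v => v) with
    | some m, some M => decide (m < c_x ∧ c_x < M)
    | _, _ => false

def is_enclosed_island (island : List (Int × Int)) (main_loop_y main_loop_x : PySem.Dict Int (List Int)) : Bool :=
  match island with
  | [] => true
  | c :: rest =>
    if PySem.Int.mod c.1 2 == 1 || PySem.Int.mod c.2 2 == 1 then
      is_enclosed_island rest main_loop_y main_loop_x
    else
      let cy := PySem.Int.floordiv c.1 2
      let cx := PySem.Int.floordiv c.2 2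
      if !(is_enclosed_vertical cy cx main_loop_x) then false
      else if !(is_enclosed_horizontal cy cx main_loop_y) then false
      else is_enclosed_island rest main_loop_y main_loop_x

def get_enclosed_islands (islands : List (List (Int × Int))) (main_loop : List (Int × Int)) : List (List (Int × Int)) :=
  let main_loop_x := main_loop.foldl (fun d p => d.modify p.2 [] (fun l => l ++ [p.1])) PySem.Dict.empty
  let main_loop_y := main_loop.foldl (fun d p => d.modify p.1 [] (fun l => l ++ [p.2])) PySem.Dict.empty
  islands.foldl (fun acc island => if is_enclosed_island island main_loop_y main_loop_x then acc ++ [island] else acc) []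

-- ===== PORT B =====
def pvB_updX (d : PySem.Dict Int (Int × Int)) (p : Int × Int) : PySem.Dict Int (Int × Int) :=
  match d.get? p.2 with
  | none => d.insert p.2 (p.1, p.1)
  | some b => d.insert p.2 (min b.1 p.1, max b.2 p.1)

def pvB_updY (d : PySem.Dict Int (Int × Int)) (p : Int × Int) : PySem.Dict Int (Int × Int) :=
  match d.get? p.1 with
  | none => d.insert p.1 (p.2, p.2)
  | some b => d.insert p.1 (min b.1 p.2, max b.2 p.2)

def pvB_cellOk (c : Int × Int) (x_bounds y_bounds : PySem.Dict Int (Int × Int)) : Bool :=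
  if PySem.Int.mod c.1 2 == 1 || PySem.Int.mod c.2 2 == 1 then true
  else
    let hy := PySem.Int.floordiv c.1 2
    let hx := PySem.Int.floordiv c.2 2
    match x_bounds.get? hx with
    | none => false
    | some bx =>
      if !(decide (bx.1 < hy ∧ hy < bx.2)) then false
      else
        match y_bounds.get? hy with
        | none => false
        | some b => decide (b.1 < hx ∧ hx < b.2)

def get_enclosed_islands_alt (islands : List (List (Int × Int))) (main_loop : List (Int × Int)) : List (List (Int × Int)) :=
  let s := main_loop.foldl (fun s p => (pvB_updX s.1 p, pvB_updY s.2 p)) (PySem.Dict.empty, PySem.Dict.empty)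
  islands.filter (fun isl => isl.all (fun c => pvB_cellOk c s.1 s.2))

-- ===== PRECONDITION & SPEC =====
def Spec_get_enclosed_islands (islands : List (List (Int × Int))) (main_loop : List (Int × Int)) (out : List (List (Int × Int))) : Prop := out = get_enclosed_islands_alt islands main_loop
instance (islands : List (List (Int × Int))) (main_loop : List (Int × Int)) (out : List (List (Int × Int))) : Decidable (Spec_get_enclosed_islands islands main_loop out) := by unfold Spec_get_enclosed_islands; infer_instance

-- ===== CLAIM (what is proved, stated in full; the proofs are below) =====
def Claim_equal_get_enclosed_islands : Prop := ∀ (islands : List (List (Int × Int))) (main_loop : List (Int × Int)), Dom_get_enclosed_islands islands main_loop → Spec_get_enclosed_islands islands main_loop (get_enclosed_islands islands main_loop)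

-- ===== LEMMAS AND PROOFS =====

-- running (min, max) step, the per-element effect of pvB_updX/pvB_updY on one key
def pvB_bstep (ob : Option (Int × Int)) (y : Int) : Option (Int × Int) :=
  match ob with
  | none => some (y, y)
  | some b => some (min b.1 y, max b.2 y)

lemma pvB_foldl_bstep (t : List Int) : ∀ (a b : Int),
    t.foldl pvB_bstep (some (a, b)) = some (t.foldl min a, t.foldl max b) := by
  induction t with
  | nil => intro a b; simp
  | cons y t ih => intro a b; simpa [pvB_bstep] using ih (min a y) (max b y)

lemma pvB_updX_get? (ml : List (Int × Int)) : ∀ (d : PySem.Dict Int (Int × Int)) (k : Int),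
    (ml.foldl pvB_updX d).get? k
      = ((ml.filter (fun p => p.2 == k)).map (·.1)).foldl pvB_bstep (d.get? k) := by
  induction ml with
  | nil => intro d k; simp
  | cons p ml ih =>
    intro d k
    by_cases hk : p.2 = k
    · subst hk
      simp only [List.foldl_cons, List.filter_cons, beq_self_eq_true, if_pos, List.map_cons]
      rw [ih]
      congr 1
      unfold pvB_updX pvB_bstep
      cases d.get? p.2 with
      | none => simp [PySem.Dict.get?_insert_self]
      | some b => simp [PySem.Dict.get?_insert_self]
    · have hne : (p.2 == k) = false := by simp [hk]
      simp only [List.foldl_cons, List.filter_cons, hne]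
      rw [ih]
      congr 1
      unfold pvB_updX
      cases d.get? p.2 <;>
        simp [PySem.Dict.get?_insert_of_ne _ _ (fun h => hk h.symm)]

lemma pvB_updY_get? (ml : List (Int × Int)) : ∀ (d : PySem.Dict Int (Int × Int)) (k : Int),
    (ml.foldl pvB_updY d).get? k
      = ((ml.filter (fun p => p.1 == k)).map (·.2)).foldl pvB_bstep (d.get? k) := by
  induction ml with
  | nil => intro d k; simp
  | cons p ml ih =>
    intro d k
    by_cases hk : p.1 = k
    · subst hk
      simp only [List.foldl_cons, List.filter_cons, beq_self_eq_true, if_pos, List.map_cons]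
      rw [ih]
      congr 1
      unfold pvB_updY pvB_bstep
      cases d.get? p.1 with
      | none => simp [PySem.Dict.get?_insert_self]
      | some b => simp [PySem.Dict.get?_insert_self]
    · have hne : (p.1 == k) = false := by simp [hk]
      simp only [List.foldl_cons, List.filter_cons, hne]
      rw [ih]
      congr 1
      unfold pvB_updY
      cases d.get? p.1 <;>
        simp [PySem.Dict.get?_insert_of_ne _ _ (fun h => hk h.symm)]

-- A's grouped lists, characterised by getD
lemma pvA_loopX_getD (ml : List (Int × Int)) (k : Int) :
    (ml.foldl (fun d p => d.modify p.2 [] (fun l => l ++ [p.1])) PySem.Dict.empty).getD k []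
      = (ml.filter (fun p => p.2 == k)).map (·.1) := by
  have h : ml.foldl (fun d p => d.modify p.2 [] (fun l => l ++ [p.1])) PySem.Dict.empty
      = (ml.map Prod.swap).foldl (fun d p => d.modify p.1 [] (fun l => l ++ [p.2])) PySem.Dict.empty := by
    rw [List.foldl_map]
    rfl
  rw [h, PySem.Dict.getD_foldl_modify_append]
  simp [List.filter_map, Function.comp_def, Prod.swap]

lemma pvA_loopY_getD (ml : List (Int × Int)) (k : Int) :
    (ml.foldl (fun d p => d.modify p.1 [] (fun l => l ++ [p.2])) PySem.Dict.empty).getD k []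
      = (ml.filter (fun p => p.1 == k)).map (·.2) := by
  rw [PySem.Dict.getD_foldl_modify_append]
  simp

-- the optional running bounds of a list decide the same strict-betweenness test as min/max
lemma pv_between_eq (ys : List Int) (c : Int) :
    (match ys.foldl pvB_bstep none with
     | none => false
     | some b => decide (b.1 < c ∧ c < b.2))
    = (if ys.isEmpty then false
       else
         match PySem.List.min? ys (fun v => v), PySem.List.max? ys (fun v => v) with
         | some m, some M => decide (m < c ∧ c < M)
         | _, _ => false) := by
  cases ys with
  | nil => rfl
  | cons y t =>
    simp [PySem.List.min?_id_cons, PySem.List.max?_id_cons, pvB_foldl_bstep, pvB_bstep]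

-- B's early-exit chain of the two option tests is their conjunction
lemma pv_chain_eq (ox oy : Option (Int × Int)) (hy hx : Int) :
    (match ox with
     | none => false
     | some bx =>
       if !(decide (bx.1 < hy ∧ hy < bx.2)) then false
       else
         match oy with
         | none => false
         | some b => decide (b.1 < hx ∧ hx < b.2))
    = ((match ox with | none => false | some bx => decide (bx.1 < hy ∧ hy < bx.2)) &&
       (match oy with | none => false | some b => decide (b.1 < hx ∧ hx < b.2))) := by
  cases ox with
  | none => rfl
  | some bx =>
    cases oy with
    | none => by_cases h : bx.1 < hy ∧ hy < bx.2 <;> simp [h]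
    | some b => by_cases h : bx.1 < hy ∧ hy < bx.2 <;> simp [h]

-- the per-cell checks agree
lemma pv_cell_eq (ml : List (Int × Int)) (c : Int × Int) :
    pvB_cellOk c (ml.foldl pvB_updX PySem.Dict.empty) (ml.foldl pvB_updY PySem.Dict.empty)
      = (if PySem.Int.mod c.1 2 == 1 || PySem.Int.mod c.2 2 == 1 then true
         else
           is_enclosed_vertical (PySem.Int.floordiv c.1 2) (PySem.Int.floordiv c.2 2)
             (ml.foldl (fun d p => d.modify p.2 [] (fun l => l ++ [p.1])) PySem.Dict.empty)
           && is_enclosed_horizontal (PySem.Int.floordiv c.1 2) (PySem.Int.floordiv c.2 2)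
             (ml.foldl (fun d p => d.modify p.1 [] (fun l => l ++ [p.2])) PySem.Dict.empty)) := by
  unfold pvB_cellOk is_enclosed_vertical is_enclosed_horizontal
  by_cases hodd : (PySem.Int.mod c.1 2 == 1 || PySem.Int.mod c.2 2 == 1) = true
  · rw [if_pos hodd, if_pos hodd]
  · rw [if_neg hodd, if_neg hodd]
    simp only [pvB_updX_get?, pvB_updY_get?, PySem.Dict.get?_empty]
    rw [pv_chain_eq, pv_between_eq, pv_between_eq, pvA_loopX_getD, pvA_loopY_getD]

-- A's early-return island loop is an 'all' of the per-cell check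
lemma pv_island_eq (ml : List (Int × Int)) (isl : List (Int × Int)) :
    is_enclosed_island isl
      (ml.foldl (fun d p => d.modify p.1 [] (fun l => l ++ [p.2])) PySem.Dict.empty)
      (ml.foldl (fun d p => d.modify p.2 [] (fun l => l ++ [p.1])) PySem.Dict.empty)
      = isl.all (fun c => pvB_cellOk c (ml.foldl pvB_updX PySem.Dict.empty) (ml.foldl pvB_updY PySem.Dict.empty)) := by
  induction isl with
  | nil => simp [is_enclosed_island]
  | cons c rest ih =>
    rw [List.all_cons, pv_cell_eq ml c]
    unfold is_enclosed_island
    by_cases hodd : (PySem.Int.mod c.1 2 == 1 || PySem.Int.mod c.2 2 == 1) = true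
    · rw [if_pos hodd, if_pos hodd, ih, Bool.true_and]
    · rw [if_neg hodd, if_neg hodd]
      simp [ih, Bool.and_assoc]

-- ===== VERDICT (by name: the statement is the Claim_ definition above) =====
theorem get_enclosed_islands_spec : Claim_equal_get_enclosed_islands := by
  intro islands ml _
  unfold Spec_get_enclosed_islands get_enclosed_islands get_enclosed_islands_alt
  rw [PySem.List.foldl_prod_mk (f := pvB_updX) (g := pvB_updY)]
  rw [PySem.List.foldl_append_if_eq_filter]
  simp only [List.nil_append]
  exact List.filter_congr (fun isl _ => by rw [pv_island_eq ml isl])
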